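-- pv_equiv track=rewrite | github.com/dlindo55/image-feast-organizer | convert-calendar.py | choose_best_feast_name
-- ===== SOURCE A (Python) =====
-- def choose_best_feast_name(summaries):
--     cleaned = []
--
--     for summary in summaries:
--         summary = summary.replace("›", "").strip()
--         cleaned.append(summary)
--
--     priority_words = [
--         "Sunday",
--         "Easter",
--         "Pentecost",
--         "Ash Wednesday",
--         "Good Friday",
--         "Holy Thursday",
--         "Holy Saturday",
--         "Christmas",
--         "Nativity",
--         "Epiphany",
--         "Ascension",
--         "Corpus Christi",
--         "Christ the King",
--         "Sacred Heart",
--         "Immaculate Conception",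
--         "Assumption",
--         "All Saints",
--         "All Souls",
--     ]
--
--     for word in priority_words:
--         for summary in cleaned:
--             if word.lower() in summary.lower():
--                 return summary
--
--     return cleaned[0] if cleaned else ""
-- ===== SOURCE B (Python) =====
-- def choose_best_feast_name(summaries):
--     priority_words = [
--         "Sunday", "Easter", "Pentecost", "Ash Wednesday", "Good Friday",
--         "Holy Thursday", "Holy Saturday", "Christmas", "Nativity", "Epiphany",
--         "Ascension", "Corpus Christi", "Christ the King", "Sacred Heart",
--         "Immaculate Conception", "Assumption", "All Saints", "All Souls",
--     ]
--     cleaned = [s.replace("›", "").strip() for s in summaries]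
--     n = len(priority_words)
--     best, best_p = "", n
--     for s in cleaned:
--         low = s.lower()
--         p = next((i for i, w in enumerate(priority_words) if w.lower() in low), n)
--         if p < best_p:
--             best, best_p = s, p
--     if best_p == n:
--         return cleaned[0] if cleaned else ""
--     return best
-- ===== Notes on version B (the rewrite author's own statement) =====
-- stated objective: alternative
-- what changed: Replaces A's word-major double loop (up to 18 full rescans of the cleaned list) with a single summary-major pass that computes each summary's priority (index of the first matching keyword) and keeps a running first-at-minimum best.
import Mathlib
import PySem

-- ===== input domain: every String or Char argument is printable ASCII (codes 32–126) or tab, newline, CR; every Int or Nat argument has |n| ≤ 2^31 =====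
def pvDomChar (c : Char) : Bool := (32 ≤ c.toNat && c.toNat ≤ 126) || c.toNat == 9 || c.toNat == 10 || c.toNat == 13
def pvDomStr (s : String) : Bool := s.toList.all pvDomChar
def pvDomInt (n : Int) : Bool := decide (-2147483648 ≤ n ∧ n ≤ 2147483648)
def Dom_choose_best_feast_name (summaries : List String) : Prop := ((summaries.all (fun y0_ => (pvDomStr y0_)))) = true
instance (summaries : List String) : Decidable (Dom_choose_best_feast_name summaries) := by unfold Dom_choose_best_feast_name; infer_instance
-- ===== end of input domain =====

-- B replaces A's word-major double loop by one summary-major pass keeping the first summary of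
-- minimum keyword priority (objective: alternative decomposition, same cost).

-- shared constant: the priority keyword list (a literal in both Pythons)
def pvWords : List String :=
  ["Sunday", "Easter", "Pentecost", "Ash Wednesday", "Good Friday",
   "Holy Thursday", "Holy Saturday", "Christmas", "Nativity", "Epiphany",
   "Ascension", "Corpus Christi", "Christ the King", "Sacred Heart",
   "Immaculate Conception", "Assumption", "All Saints", "All Souls"]

-- summary.replace("›", "").strip()
def pvClean (s : String) : String := PySem.Str.strip (PySem.Str.replace s "›" "")

-- word.lower() in summary.lower()
def pvHit (w s : String) : Bool := PySem.Str.isIn (PySem.Str.lower w) (PySem.Str.lower s)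

-- ===== PORT A =====
-- inner loop: first cleaned summary containing word w
def pvFindA (w : String) (cleaned : List String) : Option String :=
  match cleaned with
  | [] => none
  | s :: rest => if pvHit w s then some s else pvFindA w rest

-- outer loop over priority_words; `some s` = the early `return summary`
def pvLoopA (words cleaned : List String) : Option String :=
  match words with
  | [] => none
  | w :: ws =>
    match pvFindA w cleaned with
    | some s => some s
    | none => pvLoopA ws cleaned

def choose_best_feast_name (summaries : List String) : String :=
  let cleaned := summaries.foldl (fun acc s => acc ++ [pvClean s]) []
  match pvLoopA pvWords cleaned with
  | some s => s
  | none => match cleaned with | [] => "" | c :: _ => c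

-- ===== PORT B =====
-- next((i for i, w in enumerate(words) if w.lower() in low), len(words))
def pvPrio (words : List String) (low : String) : Nat :=
  match words with
  | [] => 0
  | w :: ws => if PySem.Str.isIn (PySem.Str.lower w) low then 0 else 1 + pvPrio ws low

-- the body of B's single pass: update (best, best_p) when strictly better
def pvStepW (words : List String) (st : String × Nat) (s : String) : String × Nat :=
  let p := pvPrio words (PySem.Str.lower s)
  if p < st.2 then (s, p) else st

def choose_best_feast_name_alt (summaries : List String) : String :=
  let cleaned := summaries.map pvClean
  let st := cleaned.foldl (pvStepW pvWords) ("", pvWords.length)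
  if st.2 = pvWords.length then (match cleaned with | [] => "" | c :: _ => c) else st.1

-- ===== PRECONDITION & SPEC =====
def Spec_choose_best_feast_name (summaries : List String) (out : String) : Prop := out = choose_best_feast_name_alt summaries
instance (summaries : List String) (out : String) : Decidable (Spec_choose_best_feast_name summaries out) := by unfold Spec_choose_best_feast_name; infer_instance

-- ===== CLAIM (what is proved, stated in full; the proofs are below) =====
def Claim_equal_choose_best_feast_name : Prop := ∀ (summaries : List String), Dom_choose_best_feast_name summaries → Spec_choose_best_feast_name summaries (choose_best_feast_name summaries)

-- ===== LEMMAS AND PROOFS =====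

-- A's pvFindA = none means no cleaned summary hits w
lemma pvFindA_none (w : String) : ∀ (cleaned : List String), pvFindA w cleaned = none →
    ∀ c ∈ cleaned, pvHit w c = false := by
  intro cleaned
  induction cleaned with
  | nil => intro _ c hc; simp at hc
  | cons x rest ih =>
    intro h c hc
    by_cases hx : pvHit w x = true
    · simp [pvFindA, hx] at h
    · rcases List.mem_cons.mp hc with rfl | hmem
      · exact eq_false_of_ne_true hx
      · exact ih (by simpa [pvFindA, hx] using h) c hmem

-- once best_p = 0, the fold never updates again
lemma pvFold_zero (words : List String) (b : String) (cleaned : List String) :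
    cleaned.foldl (pvStepW words) (b, 0) = (b, 0) := by
  induction cleaned with
  | nil => rfl
  | cons c rest ih => simp [List.foldl, pvStepW, ih]

-- if w has a hit, the (w::ws)-fold ends at the FIRST hit of w, with priority 0
lemma pvFold_head_hit (w : String) (ws : List String) (s : String) :
    ∀ (cleaned : List String) (st : String × Nat), 1 ≤ st.2 → pvFindA w cleaned = some s →
    cleaned.foldl (pvStepW (w :: ws)) st = (s, 0) := by
  intro cleaned
  induction cleaned with
  | nil => intro st _ h; simp [pvFindA] at h
  | cons c rest ih =>
    intro st hst h
    simp only [List.foldl]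
    by_cases hc : pvHit w c = true
    · have hs : s = c := by simp [pvFindA, hc] at h; exact h.symm
      have hq0 : pvPrio (w :: ws) (PySem.Str.lower c) = 0 := by
        unfold pvHit at hc
        simp at hc
        simp [pvPrio, hc]
      have hstep : pvStepW (w :: ws) st c = (c, 0) := by
        simp only [pvStepW, hq0]
        rw [if_pos (by omega)]
      rw [hstep, hs]
      exact pvFold_zero _ _ _
    · have h' : pvFindA w rest = some s := by simpa [pvFindA, hc] using h
      have hc' : pvHit w c = false := eq_false_of_ne_true hc
      have hq : pvPrio (w :: ws) (PySem.Str.lower c) = pvPrio ws (PySem.Str.lower c) + 1 := by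
        unfold pvHit at hc'
        simp at hc'
        simp [pvPrio, hc']
        omega
      have hstep2 : 1 ≤ (pvStepW (w :: ws) st c).2 := by
        simp only [pvStepW, hq]
        split
        · exact Nat.le_add_left 1 _
        · exact hst
      exact ih _ hstep2 h'

-- if w never hits, every priority shifts by one and the fold result shifts with it
lemma pvFold_shift (w : String) (ws : List String) :
    ∀ (cleaned : List String), (∀ c ∈ cleaned, pvHit w c = false) →
    ∀ (b : String) (p : Nat),
      cleaned.foldl (pvStepW (w :: ws)) (b, p + 1) =
        ((cleaned.foldl (pvStepW ws) (b, p)).1, (cleaned.foldl (pvStepW ws) (b, p)).2 + 1) := by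
  intro cleaned
  induction cleaned with
  | nil => intro _ b p; rfl
  | cons c rest ih =>
    intro hall b p
    have hc : pvHit w c = false := hall c (List.mem_cons_self ..)
    have hrest : ∀ x ∈ rest, pvHit w x = false := fun x hx => hall x (List.mem_cons_of_mem _ hx)
    unfold pvHit at hc
    simp at hc
    simp only [List.foldl]
    have hq : pvPrio (w :: ws) (PySem.Str.lower c) = pvPrio ws (PySem.Str.lower c) + 1 := by
      simp [pvPrio, hc]
      omega
    by_cases hlt : pvPrio ws (PySem.Str.lower c) < p
    · rw [show pvStepW (w :: ws) (b, p + 1) c = (c, pvPrio ws (PySem.Str.lower c) + 1) from by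
          simp only [pvStepW, hq]
          rw [if_pos (by omega)],
        show pvStepW ws (b, p) c = (c, pvPrio ws (PySem.Str.lower c)) from by
          simp only [pvStepW]
          rw [if_pos hlt]]
      exact ih hrest c _
    · rw [show pvStepW (w :: ws) (b, p + 1) c = (b, p + 1) from by
          simp only [pvStepW, hq]
          rw [if_neg (by omega)],
        show pvStepW ws (b, p) c = (b, p) from by
          simp only [pvStepW]
          rw [if_neg hlt]]
      exact ih hrest b p

-- the fold's outcome is exactly A's double loop's outcome
lemma pvFold_char (words : List String) (cleaned : List String) :
    (pvLoopA words cleaned = none ∧ (cleaned.foldl (pvStepW words) ("", words.length)).2 = words.length)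
    ∨ (∃ s p, pvLoopA words cleaned = some s ∧
        cleaned.foldl (pvStepW words) ("", words.length) = (s, p) ∧ p < words.length) := by
  induction words with
  | nil => exact Or.inl ⟨rfl, by rw [show ([] : List String).length = 0 from rfl, pvFold_zero]⟩
  | cons w ws ih =>
    cases hfind : pvFindA w cleaned with
    | some s =>
      refine Or.inr ⟨s, 0, by simp [pvLoopA, hfind], ?_, by simp⟩
      exact pvFold_head_hit w ws s cleaned ("", (w :: ws).length) (by simp) hfind
    | none =>
      have hall := pvFindA_none w cleaned hfind
      rw [show (w :: ws).length = ws.length + 1 from rfl, pvFold_shift w ws cleaned hall "" ws.length]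
      rcases ih with ⟨h1, h2⟩ | ⟨s, p, h1, h2, h3⟩
      · exact Or.inl ⟨by simp [pvLoopA, hfind, h1], by rw [h2]⟩
      · exact Or.inr ⟨s, p + 1, by simp [pvLoopA, hfind, h1], by rw [h2], by omega⟩

-- the whole function, on an arbitrary cleaned list
lemma pvMain (cleaned : List String) :
    (match pvLoopA pvWords cleaned with
     | some s => s
     | none => match cleaned with | [] => "" | c :: _ => c) =
    (let st := cleaned.foldl (pvStepW pvWords) ("", pvWords.length)
     if st.2 = pvWords.length then (match cleaned with | [] => "" | c :: _ => c) else st.1) := by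
  rcases pvFold_char pvWords cleaned with ⟨h1, h2⟩ | ⟨s, p, h1, h2, h3⟩
  · simp [h1, h2]
  · simp only [h1, h2]
    rw [if_neg (Nat.ne_of_lt h3)]

-- A builds `cleaned` by append-in-a-loop; B by a comprehension (map)
lemma pvCleaned_eq (summaries : List String) :
    summaries.foldl (fun acc s => acc ++ [pvClean s]) [] = summaries.map pvClean := by
  rw [PySem.List.foldl_append_singleton_eq_map]
  simp

-- ===== VERDICT (by name: the statement is the Claim_ definition above) =====
theorem choose_best_feast_name_spec : Claim_equal_choose_best_feast_name := by
  intro summaries _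
  unfold Spec_choose_best_feast_name choose_best_feast_name choose_best_feast_name_alt
  rw [pvCleaned_eq]
  exact pvMain (summaries.map pvClean)
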